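-- pv_equiv track=rewrite | github.com/DPNT-Sourcecode/FIZ-txik01 | lib/solutions/FIZ/fizz_buzz_solution.py | same_dig
-- ===== SOURCE A (Python) =====
-- import collections
--
-- def same_dig(number):
--     try:
--         countOfWords = collections.Counter(str(number))
--         result = [countOfWords[i] for i in countOfWords if countOfWords[i]>1]
--         if len(str(number))==result[0]:
--             return True
--         else:
--             return False
--     except:
--         return False
-- ===== SOURCE B (Python) =====
-- def same_dig(number):
--     s = str(number)
--     return len(s) > 1 and all(c == s[0] for c in s)
-- ===== Notes on version B (the rewrite author's own statement) =====
-- stated objective: simpler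
-- what changed: Replaces the Counter/list-comprehension/indexing-with-exception logic by a direct single-pass scan: true iff str(number) has at least two characters and every character equals the first.
import Mathlib
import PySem

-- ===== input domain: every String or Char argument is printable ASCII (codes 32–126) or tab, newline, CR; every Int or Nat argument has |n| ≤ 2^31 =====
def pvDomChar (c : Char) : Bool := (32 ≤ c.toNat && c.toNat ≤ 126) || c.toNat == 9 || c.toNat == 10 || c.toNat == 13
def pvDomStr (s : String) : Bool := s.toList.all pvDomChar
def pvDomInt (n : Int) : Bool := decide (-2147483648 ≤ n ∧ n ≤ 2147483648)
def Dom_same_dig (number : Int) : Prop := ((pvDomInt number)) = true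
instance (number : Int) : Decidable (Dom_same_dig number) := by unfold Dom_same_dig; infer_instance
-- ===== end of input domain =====

-- B replaces A's Counter + comprehension + exception-guarded indexing by a direct
-- single-pass scan (at least two characters, all equal to the first); objective: simpler.


-- ===== PORT A =====
-- countOfWords = Counter(str(number)); result = [countOfWords[i] for i in countOfWords if countOfWords[i] > 1];
-- result[0] raises IndexError when result is empty — caught by the bare except, returning False.
def same_dig (number : Int) : Bool :=
  let s := (PySem.Int.toStr number).toList
  let countOfWords := PySem.Dict.counter s
  let result := (countOfWords.keys.filter (fun i => countOfWords.getD i 0 > 1)).map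
                  (fun i => countOfWords.getD i 0)
  match PySem.List.pyGet? result 0 with
  | none => false                       -- IndexError → except: → False
  | some r0 => if (s.length : Int) = r0 then true else false

-- ===== PORT B =====
-- s = str(number); return len(s) > 1 and all(c == s[0] for c in s)
def same_dig_alt (number : Int) : Bool :=
  let s := (PySem.Int.toStr number).toList
  decide (1 < s.length) && s.all (fun c => c == s.headI)

-- ===== PRECONDITION & SPEC =====
def Spec_same_dig (number : Int) (out : Bool) : Prop := out = same_dig_alt number
instance (number : Int) (out : Bool) : Decidable (Spec_same_dig number out) := by unfold Spec_same_dig; infer_instance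

-- ===== CLAIM (what is proved, stated in full; the proofs are below) =====
def Claim_equal_same_dig : Prop := ∀ (number : Int), Dom_same_dig number → Spec_same_dig number (same_dig number)

-- ===== LEMMAS AND PROOFS =====

-- a nodup list whose elements are all c, containing c, is [c]
theorem pv_nodup_all_eq {α : Type} (xs : List α) (c : α) (hn : xs.Nodup)
    (hall : ∀ x ∈ xs, x = c) (hc : c ∈ xs) : xs = [c] := by
  cases xs with
  | nil => cases hc
  | cons a t =>
    have ha : a = c := hall a (List.mem_cons_self ..)
    subst ha
    have ht : t = [] := by
      cases t with
      | nil => rfl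
      | cons b t' =>
        exfalso
        have hb : b = a := hall b (by simp)
        subst hb
        exact (List.nodup_cons.mp hn).1 (by simp)
    simp [ht]

-- the core equivalence, generalized over the digit string
theorem pv_core (l : List Char) :
    (let countOfWords := PySem.Dict.counter l
     let result := (countOfWords.keys.filter (fun i => countOfWords.getD i 0 > 1)).map
                     (fun i => countOfWords.getD i 0)
     match PySem.List.pyGet? result 0 with
     | none => false
     | some r0 => if (l.length : Int) = r0 then true else false)
    = (decide (1 < l.length) && l.all (fun c => c == l.headI)) := by
  simp only
  rw [PySem.List.pyGet?_zero]
  set d := PySem.Dict.counter l with hd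
  have hkeys : d.keys = PySem.List.dedup l := by
    rw [hd, PySem.Dict.keys_counter]; simp
  have hgetD : ∀ i, d.getD i 0 = (l.count i : Int) := fun i => by
    rw [hd, PySem.Dict.getD_counter]
  set result := (d.keys.filter (fun i => d.getD i 0 > 1)).map (fun i => d.getD i 0) with hres
  have heq : result = ((PySem.List.dedup l).filter (fun i => (l.count i : Int) > 1)).map
                        (fun i => (l.count i : Int)) := by
    rw [hres, hkeys]; simp only [hgetD]
  rcases Bool.eq_false_or_eq_true (decide (1 < l.length) && l.all (fun c => c == l.headI))
    with hB | hB
  · -- B true: l is nonempty, all chars equal headI, length > 1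
    rw [hB]
    obtain ⟨h1, hall⟩ := Bool.and_eq_true_iff.mp hB
    have hlen : 1 < l.length := by simpa using h1
    have hne : l ≠ [] := by intro h; simp [h] at hlen
    set c := l.headI with hc
    have hallc : ∀ x ∈ l, x = c := by
      intro x hx
      have := List.all_eq_true.mp hall x hx
      simpa using this
    have hcmem : c ∈ l := by
      cases l with
      | nil => exact absurd rfl hne
      | cons a t => simp [hc]
    have hded : PySem.List.dedup l = [c] := by
      apply pv_nodup_all_eq _ _ (PySem.List.nodup_dedup l)
      · intro x hx
        exact hallc x ((PySem.List.mem_dedup _ _).mp hx)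
      · exact (PySem.List.mem_dedup _ _).mpr hcmem
    have hcount : l.count c = l.length := (List.count_eq_length).mpr
      (fun b hb => (hallc b hb).symm)
    have hgt : ((l.count c : Int) > 1) := by
      have : 1 < l.count c := by rw [hcount]; exact hlen
      exact_mod_cast this
    rw [heq, hded]
    simp [hcount, hlen]

  · -- B false: show A yields false
    rw [hB, heq]
    cases hh : (((PySem.List.dedup l).filter (fun i => (l.count i : Int) > 1)).map
                 (fun i => (l.count i : Int)))[0]? with
    | none => rfl
    | some r0 =>
      have hmem : r0 ∈ ((PySem.List.dedup l).filter (fun i => (l.count i : Int) > 1)).map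
                       (fun i => (l.count i : Int)) :=
        List.mem_of_getElem? hh
      obtain ⟨k, hk, hkr⟩ := List.mem_map.mp hmem
      have hkf := List.mem_filter.mp hk
      have hkl : k ∈ l := (PySem.List.mem_dedup _ _).mp hkf.1
      have hkgt : (l.count k : Int) > 1 := by simpa using hkf.2
      by_cases hlr : (l.length : Int) = r0
      · exfalso
        -- count k = length → all chars = k → B would be true, contradicting hB
        have hcl : l.count k = l.length := by
          have : (l.count k : Int) = (l.length : Int) := by rw [hkr, hlr]
          exact_mod_cast this
        have hallk : ∀ b ∈ l, k = b := (List.count_eq_length).mp hcl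
        have hne : l ≠ [] := List.ne_nil_of_mem hkl
        have hhead : l.headI = k := by
          cases l with
          | nil => exact absurd rfl hne
          | cons a t => exact (hallk a (by simp)).symm
        have hlen1 : 1 < l.length := by
          have h1 : 1 < l.count k := by exact_mod_cast hkgt
          exact lt_of_lt_of_le h1 (List.count_le_length ..)
        have hT : (decide (1 < l.length) && l.all (fun c => c == l.headI)) = true := by
          rw [Bool.and_eq_true_iff]
          refine ⟨by simpa using hlen1, List.all_eq_true.mpr ?_⟩
          intro x hx
          simp [hhead, (hallk x hx).symm]
        rw [hB] at hT; cases hT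
      · simp [hlr]

-- ===== VERDICT (by name: the statement is the Claim_ definition above) =====
theorem same_dig_spec : Claim_equal_same_dig := by
  intro number _
  unfold Spec_same_dig same_dig same_dig_alt
  exact pv_core ((PySem.Int.toStr number).toList)
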